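-- pv_equiv track=rewrite | github.com/nikadilli/Ilaps-v2 | side_functions.py | element_formater
-- ===== SOURCE A (Python) =====
-- def element_formater(elem, lst_of_elems):
--     # matches the given element format to the one used in list
--     if elem in lst_of_elems:
--         return elem
--     elif elem not in lst_of_elems:
--         elem = elem.replace('(LR)', '').replace('(MR)', '').replace('(HR)', '')
--         if elem in lst_of_elems:
--             return elem
--         elif elem not in lst_of_elems:
--             elem = elem + '(LR)'
--             if elem in lst_of_elems:
--                 return elem
--             elif elem not in lst_of_elems:
--                 elem = elem.replace('(LR)', '')
--                 elem = elem + '(MR)'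
--                 if elem in lst_of_elems:
--                     return elem
--                 elif elem not in lst_of_elems:
--                     elem = elem.replace('(MR)', '')
--                     elem = elem + '(HR)'
--                     if elem in lst_of_elems:
--                         return elem
--                     elif elem not in lst_of_elems:
--                         elem = elem.replace('(HR)', '')
--                         elem = ''.join([c for c in elem if c.isalpha()])
--                         if elem in lst_of_elems:
--                             return elem
--                         else:
--                             return
-- ===== SOURCE B (Python) =====
-- def element_formater(elem, lst_of_elems):
--     # Inverted strategy: index the six trial strings by priority once, then a
--     # single pass over lst_of_elems keeps the smallest-priority match.
--     base = elem.replace('(LR)', '').replace('(MR)', '').replace('(HR)', '')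
--     c2 = base + '(LR)'
--     c3 = c2.replace('(LR)', '') + '(MR)'
--     c4 = c3.replace('(MR)', '') + '(HR)'
--     c5 = ''.join(ch for ch in c4.replace('(HR)', '') if ch.isalpha())
--     cands = [elem, base, c2, c3, c4, c5]
--     rank = {}
--     for r, c in reversed(list(enumerate(cands))):
--         rank[c] = r
--     best = None
--     for entry in lst_of_elems:
--         r = rank.get(entry)
--         if r is not None and (best is None or r < best):
--             best = r
--     return None if best is None else cands[best]
-- ===== Notes on version B (the rewrite author's own statement) =====
-- stated objective: alternative
-- what changed: Inverts the traversal: instead of A's cascade of six membership scans of the list, B builds a hash index mapping each of the six trial strings to its priority once and makes a single pass over lst_of_elems keeping the smallest priority seen, returning that candidate.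
import Mathlib
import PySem

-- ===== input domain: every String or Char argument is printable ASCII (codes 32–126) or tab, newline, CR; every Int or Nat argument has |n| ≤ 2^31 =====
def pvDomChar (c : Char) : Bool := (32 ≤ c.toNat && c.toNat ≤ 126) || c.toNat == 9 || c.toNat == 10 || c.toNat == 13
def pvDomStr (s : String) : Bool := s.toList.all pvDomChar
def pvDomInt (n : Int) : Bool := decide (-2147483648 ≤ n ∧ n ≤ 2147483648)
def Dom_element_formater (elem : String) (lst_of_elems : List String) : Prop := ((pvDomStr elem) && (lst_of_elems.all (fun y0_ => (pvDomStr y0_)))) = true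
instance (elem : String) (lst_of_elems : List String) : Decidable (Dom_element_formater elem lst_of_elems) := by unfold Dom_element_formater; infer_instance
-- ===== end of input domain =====

-- B replaces A's cascade of six membership scans by a priority index of the six trial
-- strings and a single minimum-priority pass over the list (objective: alternative).

-- ===== PORT A =====
-- ''.join([c for c in s if c.isalpha()]) is String.ofList of the filtered chars (exact: joining 1-char strings).
def element_formater (elem : String) (lst_of_elems : List String) : Option String :=
  if lst_of_elems.contains elem then some elem
  else
    let e1 := PySem.Str.replace (PySem.Str.replace (PySem.Str.replace elem "(LR)" "") "(MR)" "") "(HR)" ""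
    if lst_of_elems.contains e1 then some e1
    else
      let e2 := e1 ++ "(LR)"
      if lst_of_elems.contains e2 then some e2
      else
        let e3 := PySem.Str.replace e2 "(LR)" "" ++ "(MR)"
        if lst_of_elems.contains e3 then some e3
        else
          let e4 := PySem.Str.replace e3 "(MR)" "" ++ "(HR)"
          if lst_of_elems.contains e4 then some e4
          else
            let e5 := String.ofList ((PySem.Str.replace e4 "(HR)" "").toList.filter PySem.Chars.isalpha)
            if lst_of_elems.contains e5 then some e5
            else none

-- ===== PORT B =====
def element_formater_alt (elem : String) (lst_of_elems : List String) : Option String :=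
  let base := PySem.Str.replace (PySem.Str.replace (PySem.Str.replace elem "(LR)" "") "(MR)" "") "(HR)" ""
  let c2 := base ++ "(LR)"
  let c3 := PySem.Str.replace c2 "(LR)" "" ++ "(MR)"
  let c4 := PySem.Str.replace c3 "(MR)" "" ++ "(HR)"
  let c5 := String.ofList ((PySem.Str.replace c4 "(HR)" "").toList.filter PySem.Chars.isalpha)
  let cands := [elem, base, c2, c3, c4, c5]
  let rank := ((PySem.List.enumerate cands 0).reverse).foldl
      (fun d (p : Int × String) => d.insert p.2 p.1) PySem.Dict.empty
  let best := lst_of_elems.foldl (fun best entry =>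
      match rank.get? entry with
      | none => best
      | some r => match best with
        | none => some r
        | some b => if r < b then some r else best) (none : Option Int)
  best.bind (fun b => PySem.List.pyGet? cands b)

-- ===== PRECONDITION & SPEC =====
def Spec_element_formater (elem : String) (lst_of_elems : List String) (out : Option String) : Prop := out = element_formater_alt elem lst_of_elems
instance (elem : String) (lst_of_elems : List String) (out : Option String) : Decidable (Spec_element_formater elem lst_of_elems out) := by unfold Spec_element_formater; infer_instance

-- ===== CLAIM (what is proved, stated in full; the proofs are below) =====
def Claim_equal_element_formater : Prop := ∀ (elem : String) (lst_of_elems : List String), Dom_element_formater elem lst_of_elems → Spec_element_formater elem lst_of_elems (element_formater elem lst_of_elems)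

-- ===== LEMMAS AND PROOFS =====

-- option-minimum: the merge operation realised by B's accumulator update
def pvOmin : Option Int → Option Int → Option Int
  | none, b => b
  | a, none => a
  | some x, some y => some (min x y)

-- the priority of a string: its first index among the six candidates (what rank.get? computes)
def pvLookup (c0 c1 c2 c3 c4 c5 s : String) : Option Int :=
  if s = c0 then some 0 else if s = c1 then some 1 else if s = c2 then some 2
  else if s = c3 then some 3 else if s = c4 then some 4 else if s = c5 then some 5 else none

-- index of the first candidate contained in lst (the shape of A's cascade)
def pvFirst (c0 c1 c2 c3 c4 c5 : String) (lst : List String) : Option Int :=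
  if lst.contains c0 then some 0 else if lst.contains c1 then some 1 else if lst.contains c2 then some 2
  else if lst.contains c3 then some 3 else if lst.contains c4 then some 4 else if lst.contains c5 then some 5 else none

theorem pvOmin_none_right (a : Option Int) : pvOmin a none = a := by cases a <;> rfl

theorem pvOmin_assoc (a b c : Option Int) : pvOmin (pvOmin a b) c = pvOmin a (pvOmin b c) := by
  cases a <;> cases b <;> cases c <;> simp [pvOmin, min_assoc]

-- B's accumulator update is pvOmin with the entry's priority
theorem pvStep (c0 c1 c2 c3 c4 c5 : String) (acc : Option Int) (x : String) :
    (match pvLookup c0 c1 c2 c3 c4 c5 x with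
      | none => acc
      | some r => match acc with
        | none => some r
        | some b => if r < b then some r else acc) = pvOmin acc (pvLookup c0 c1 c2 c3 c4 c5 x) := by
  cases acc with
  | none => cases h : pvLookup c0 c1 c2 c3 c4 c5 x <;> simp [h, pvOmin]
  | some b =>
      cases h : pvLookup c0 c1 c2 c3 c4 c5 x with
      | none => simp [h, pvOmin]
      | some r =>
          simp only [h, pvOmin]
          split_ifs <;> simp [min_def] <;> omega

-- first-contained-candidate decomposes over a cons via pvOmin of the head's priority
theorem pvFirst_cons (c0 c1 c2 c3 c4 c5 x : String) (xs : List String) :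
    pvFirst c0 c1 c2 c3 c4 c5 (x :: xs) =
      pvOmin (pvLookup c0 c1 c2 c3 c4 c5 x) (pvFirst c0 c1 c2 c3 c4 c5 xs) := by
  by_cases h0 : x = c0
  · subst h0
    simp only [pvFirst, pvLookup, List.contains_cons, beq_self_eq_true, Bool.true_or, if_true, if_pos rfl]
    generalize xs.contains x = b0 at *
    generalize xs.contains c1 = b1 at *
    generalize xs.contains c2 = b2 at *
    generalize xs.contains c3 = b3 at *
    generalize xs.contains c4 = b4 at *
    generalize xs.contains c5 = b5 at *
    revert b0 b1 b2 b3 b4 b5; decide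
  · by_cases h1 : x = c1
    · subst h1
      have e0 : (c0 == x) = false := beq_eq_false_iff_ne.mpr (fun h => h0 h.symm)
      simp only [pvFirst, pvLookup, List.contains_cons, e0, beq_self_eq_true, Bool.true_or,
        Bool.false_or, if_true, if_pos rfl, if_neg h0]
      generalize xs.contains c0 = b0 at *
      generalize xs.contains x = b1 at *
      generalize xs.contains c2 = b2 at *
      generalize xs.contains c3 = b3 at *
      generalize xs.contains c4 = b4 at *
      generalize xs.contains c5 = b5 at *
      revert b0 b1 b2 b3 b4 b5; decide
    · by_cases h2 : x = c2
      · subst h2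
        have e0 : (c0 == x) = false := beq_eq_false_iff_ne.mpr (fun h => h0 h.symm)
        have e1 : (c1 == x) = false := beq_eq_false_iff_ne.mpr (fun h => h1 h.symm)
        simp only [pvFirst, pvLookup, List.contains_cons, e0, e1, beq_self_eq_true, Bool.true_or,
          Bool.false_or, if_true, if_pos rfl, if_neg h0, if_neg h1]
        generalize xs.contains c0 = b0 at *
        generalize xs.contains c1 = b1 at *
        generalize xs.contains x = b2 at *
        generalize xs.contains c3 = b3 at *
        generalize xs.contains c4 = b4 at *
        generalize xs.contains c5 = b5 at *
        revert b0 b1 b2 b3 b4 b5; decide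
      · by_cases h3 : x = c3
        · subst h3
          have e0 : (c0 == x) = false := beq_eq_false_iff_ne.mpr (fun h => h0 h.symm)
          have e1 : (c1 == x) = false := beq_eq_false_iff_ne.mpr (fun h => h1 h.symm)
          have e2 : (c2 == x) = false := beq_eq_false_iff_ne.mpr (fun h => h2 h.symm)
          simp only [pvFirst, pvLookup, List.contains_cons, e0, e1, e2, beq_self_eq_true, Bool.true_or,
            Bool.false_or, if_true, if_pos rfl, if_neg h0, if_neg h1, if_neg h2]
          generalize xs.contains c0 = b0 at *
          generalize xs.contains c1 = b1 at *
          generalize xs.contains c2 = b2 at *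
          generalize xs.contains x = b3 at *
          generalize xs.contains c4 = b4 at *
          generalize xs.contains c5 = b5 at *
          revert b0 b1 b2 b3 b4 b5; decide
        · by_cases h4 : x = c4
          · subst h4
            have e0 : (c0 == x) = false := beq_eq_false_iff_ne.mpr (fun h => h0 h.symm)
            have e1 : (c1 == x) = false := beq_eq_false_iff_ne.mpr (fun h => h1 h.symm)
            have e2 : (c2 == x) = false := beq_eq_false_iff_ne.mpr (fun h => h2 h.symm)
            have e3 : (c3 == x) = false := beq_eq_false_iff_ne.mpr (fun h => h3 h.symm)
            simp only [pvFirst, pvLookup, List.contains_cons, e0, e1, e2, e3, beq_self_eq_true, Bool.true_or,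
              Bool.false_or, if_true, if_pos rfl, if_neg h0, if_neg h1, if_neg h2, if_neg h3]
            generalize xs.contains c0 = b0 at *
            generalize xs.contains c1 = b1 at *
            generalize xs.contains c2 = b2 at *
            generalize xs.contains c3 = b3 at *
            generalize xs.contains x = b4 at *
            generalize xs.contains c5 = b5 at *
            revert b0 b1 b2 b3 b4 b5; decide
          · by_cases h5 : x = c5
            · subst h5
              have e0 : (c0 == x) = false := beq_eq_false_iff_ne.mpr (fun h => h0 h.symm)
              have e1 : (c1 == x) = false := beq_eq_false_iff_ne.mpr (fun h => h1 h.symm)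
              have e2 : (c2 == x) = false := beq_eq_false_iff_ne.mpr (fun h => h2 h.symm)
              have e3 : (c3 == x) = false := beq_eq_false_iff_ne.mpr (fun h => h3 h.symm)
              have e4 : (c4 == x) = false := beq_eq_false_iff_ne.mpr (fun h => h4 h.symm)
              simp only [pvFirst, pvLookup, List.contains_cons, e0, e1, e2, e3, e4, beq_self_eq_true,
                Bool.true_or, Bool.false_or, if_true, if_pos rfl, if_neg h0, if_neg h1, if_neg h2,
                if_neg h3, if_neg h4]
              generalize xs.contains c0 = b0 at *
              generalize xs.contains c1 = b1 at *
              generalize xs.contains c2 = b2 at *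
              generalize xs.contains c3 = b3 at *
              generalize xs.contains c4 = b4 at *
              generalize xs.contains x = b5 at *
              revert b0 b1 b2 b3 b4 b5; decide
            · have e0 : (c0 == x) = false := beq_eq_false_iff_ne.mpr (fun h => h0 h.symm)
              have e1 : (c1 == x) = false := beq_eq_false_iff_ne.mpr (fun h => h1 h.symm)
              have e2 : (c2 == x) = false := beq_eq_false_iff_ne.mpr (fun h => h2 h.symm)
              have e3 : (c3 == x) = false := beq_eq_false_iff_ne.mpr (fun h => h3 h.symm)
              have e4 : (c4 == x) = false := beq_eq_false_iff_ne.mpr (fun h => h4 h.symm)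
              have e5 : (c5 == x) = false := beq_eq_false_iff_ne.mpr (fun h => h5 h.symm)
              simp only [pvFirst, pvLookup, List.contains_cons, e0, e1, e2, e3, e4, e5,
                Bool.false_or, if_neg h0, if_neg h1, if_neg h2, if_neg h3, if_neg h4, if_neg h5]
              generalize xs.contains c0 = b0 at *
              generalize xs.contains c1 = b1 at *
              generalize xs.contains c2 = b2 at *
              generalize xs.contains c3 = b3 at *
              generalize xs.contains c4 = b4 at *
              generalize xs.contains c5 = b5 at *
              revert b0 b1 b2 b3 b4 b5; decide

-- B's pass over the list computes the minimum priority of the entries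
theorem pvFold_eq_first (c0 c1 c2 c3 c4 c5 : String) (lst : List String) (acc : Option Int) :
    lst.foldl (fun best entry =>
      match pvLookup c0 c1 c2 c3 c4 c5 entry with
      | none => best
      | some r => match best with
        | none => some r
        | some b => if r < b then some r else best) acc
      = pvOmin acc (pvFirst c0 c1 c2 c3 c4 c5 lst) := by
  induction lst generalizing acc with
  | nil => simp [pvFirst, pvOmin_none_right]
  | cons x xs ih =>
      simp only [List.foldl_cons]
      rw [ih, pvStep, pvOmin_assoc, ← pvFirst_cons]

-- the priority dict built by B answers exactly pvLookup
theorem pvRank_get (c0 c1 c2 c3 c4 c5 s : String) :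
    (((PySem.List.enumerate [c0, c1, c2, c3, c4, c5] 0).reverse).foldl
      (fun d (p : Int × String) => d.insert p.2 p.1) PySem.Dict.empty).get? s
    = pvLookup c0 c1 c2 c3 c4 c5 s := by
  have he : (PySem.List.enumerate [c0, c1, c2, c3, c4, c5] (0:Int)).reverse
      = [(5, c5), (4, c4), (3, c3), (2, c2), (1, c1), (0, c0)] := by
    simp [PySem.List.enumerate]
  rw [he]
  simp only [List.foldl_cons, List.foldl_nil]
  simp only [PySem.Dict.get?_insert, PySem.Dict.get?_empty, pvLookup]

-- the whole equivalence, for six arbitrary candidate strings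
theorem pvMain (c0 c1 c2 c3 c4 c5 : String) (lst : List String) :
    (if lst.contains c0 then some c0
     else if lst.contains c1 then some c1
     else if lst.contains c2 then some c2
     else if lst.contains c3 then some c3
     else if lst.contains c4 then some c4
     else if lst.contains c5 then some c5 else none)
    = (lst.foldl (fun best entry =>
        match (((PySem.List.enumerate [c0, c1, c2, c3, c4, c5] 0).reverse).foldl
          (fun d (p : Int × String) => d.insert p.2 p.1) PySem.Dict.empty).get? entry with
        | none => best
        | some r => match best with
          | none => some r
          | some b => if r < b then some r else best) (none : Option Int)).bind
        (fun b => PySem.List.pyGet? [c0, c1, c2, c3, c4, c5] b) := by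
  have hfun : (fun (best : Option Int) (entry : String) =>
      match (((PySem.List.enumerate [c0, c1, c2, c3, c4, c5] 0).reverse).foldl
        (fun d (p : Int × String) => d.insert p.2 p.1) PySem.Dict.empty).get? entry with
      | none => best
      | some r => match best with
        | none => some r
        | some b => if r < b then some r else best)
      = (fun (best : Option Int) (entry : String) =>
        match pvLookup c0 c1 c2 c3 c4 c5 entry with
        | none => best
        | some r => match best with
          | none => some r
          | some b => if r < b then some r else best) := by
    funext best entry; rw [pvRank_get]
  rw [hfun, pvFold_eq_first]
  have hnone : pvOmin none (pvFirst c0 c1 c2 c3 c4 c5 lst) = pvFirst c0 c1 c2 c3 c4 c5 lst := rfl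
  rw [hnone]
  unfold pvFirst
  split_ifs <;> rfl

-- ===== VERDICT (by name: the statement is the Claim_ definition above) =====
theorem element_formater_spec : Claim_equal_element_formater := by
  intro elem lst _
  unfold Spec_element_formater element_formater element_formater_alt
  exact pvMain elem _ _ _ _ _ lst
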